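-- pv_equiv track=rewrite | github.com/pypi-data/pypi-mirror-127 | packages/kpsh/kpsh-2.0.1-py3-none-any.whl/kpsh/commands.py | tokenize
-- ===== SOURCE A (Python) =====
-- def tokenize(seq):
--     tokens = []
--
--     i = 0
--     while i < len(seq):
--         start = seq.find("{", i)
--
--         if start != -1:
--             if i < start:
--                 tokens.append(seq[i:start])
--
--             end = seq.find("}", start)
--             nend = end + 1
--
--             if end == -1:
--                 end = len(seq) - 1
--             elif end == start + 1 and len(seq) > nend and seq[nend] == "}":  # {}}
--                 end = nend
--
--             tokens.append(seq[start : end + 1])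
--             i = end + 1
--         else:
--             tokens.append(seq[i:])
--             i = len(seq)
--
--     return tokens
-- ===== SOURCE B (Python) =====
-- def tokenize(seq):
--     # character-level state machine: TEXT / BRACE / CLOSED0 (just saw "{}"),
--     # one pass over the characters with an accumulator buffer
--     TEXT, BRACE, CLOSED0 = 0, 1, 2
--     tokens = []
--     state = TEXT
--     buf = []
--     for c in seq:
--         if state == TEXT:
--             if c == "{":
--                 if buf:
--                     tokens.append("".join(buf))
--                 buf = []
--                 state = BRACE
--             else:
--                 buf.append(c)
--         elif state == BRACE:
--             if c == "}":
--                 if buf: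
--                     tokens.append("{" + "".join(buf) + "}")
--                     buf = []
--                     state = TEXT
--                 else:
--                     state = CLOSED0
--             else:
--                 buf.append(c)
--         else:  # CLOSED0: pending "{}" token, one-char decision
--             if c == "}":
--                 tokens.append("{}}")
--                 state = TEXT
--             elif c == "{":
--                 tokens.append("{}")
--                 state = BRACE
--             else:
--                 tokens.append("{}")
--                 buf = [c]
--                 state = TEXT
--     if state == BRACE:
--         tokens.append("{" + "".join(buf))
--     elif state == CLOSED0:
--         tokens.append("{}")
--     elif buf:
--         tokens.append("".join(buf))
--     return tokens
-- ===== Notes on version B (the rewrite author's own statement) =====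
-- stated objective: alternative
-- what changed: Replaces A's find()/slice while-loop with index bookkeeping by a single character-at-a-time finite state machine (TEXT/BRACE/CLOSED0) carrying an accumulator buffer; the CLOSED0 state resolves the empty-brace double-close merge with a one-character decision instead of an index lookahead.
import Mathlib
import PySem

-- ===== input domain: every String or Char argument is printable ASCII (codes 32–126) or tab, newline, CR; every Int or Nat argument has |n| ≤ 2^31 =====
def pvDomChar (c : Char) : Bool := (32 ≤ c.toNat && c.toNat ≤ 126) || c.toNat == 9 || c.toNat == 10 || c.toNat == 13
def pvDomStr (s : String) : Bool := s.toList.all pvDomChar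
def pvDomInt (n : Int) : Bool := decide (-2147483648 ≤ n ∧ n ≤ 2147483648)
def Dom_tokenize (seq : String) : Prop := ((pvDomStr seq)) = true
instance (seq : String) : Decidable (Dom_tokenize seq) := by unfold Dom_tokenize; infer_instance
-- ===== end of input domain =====

-- B replaces A's find()/slice while-loop by a character-at-a-time finite state machine
-- (TEXT/BRACE/CLOSED0) with an accumulator buffer (objective: alternative; same O(n) cost).

-- ===== PORT A =====
-- literal port of A's while loop; `fuel` only makes the loop total (i strictly increases, so
-- fuel = len+1 is never exhausted — proved in the lemmas below), it changes no computed value.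
def tokenizeGoA (fuel : Nat) (s : List Char) (i : Int) : List String :=
  match fuel with
  | 0 => []
  | fuel + 1 =>
    if i < (s.length : Int) then
      let start := PySem.Chars.findFrom s ['{'] i
      if start ≠ -1 then
        let pre := if i < start then [String.ofList (PySem.List.slice s (some i) (some start))] else []
        let end0 := PySem.Chars.findFrom s ['}'] start
        let nend := end0 + 1
        let end1 :=
          if end0 = -1 then (s.length : Int) - 1
          else if end0 = start + 1 ∧ (s.length : Int) > nend ∧ PySem.List.pyGet? s nend = some '}' then nend
          else end0
        pre ++ [String.ofList (PySem.List.slice s (some start) (some (end1 + 1)))] ++ tokenizeGoA fuel s (end1 + 1)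
      else
        [String.ofList (PySem.List.slice s (some i) none)]
    else []

def tokenize (seq : String) : List String :=
  tokenizeGoA (seq.toList.length + 1) seq.toList 0

-- ===== PORT B =====
-- the state machine of Source B: state 0 = TEXT, 1 = BRACE, 2 = CLOSED0 (pending "{}" token);
-- the loop over the characters is the structural recursion, `buf` is the accumulator buffer,
-- each emitted token is prepended to the tokens produced by the rest of the string.
def tokenizeGoB : List Char → Nat → List Char → List String
  | [], st, buf =>
    if st = 1 then [String.ofList ('{' :: buf)]
    else if st = 2 then [String.ofList ['{', '}']]
    else if buf = [] then [] else [String.ofList buf]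
  | c :: rest, st, buf =>
    if st = 0 then
      if c = '{' then (if buf = [] then [] else [String.ofList buf]) ++ tokenizeGoB rest 1 []
      else tokenizeGoB rest 0 (buf ++ [c])
    else if st = 1 then
      if c = '}' then
        if buf = [] then tokenizeGoB rest 2 []
        else [String.ofList ('{' :: buf ++ ['}'])] ++ tokenizeGoB rest 0 []
      else tokenizeGoB rest 1 (buf ++ [c])
    else
      if c = '}' then [String.ofList ['{', '}', '}']] ++ tokenizeGoB rest 0 []
      else if c = '{' then [String.ofList ['{', '}']] ++ tokenizeGoB rest 1 []
      else [String.ofList ['{', '}']] ++ tokenizeGoB rest 0 [c]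

def tokenize_alt (seq : String) : List String := tokenizeGoB seq.toList 0 []

-- ===== PRECONDITION & SPEC =====
def Spec_tokenize (seq : String) (out : List String) : Prop := out = tokenize_alt seq
instance (seq : String) (out : List String) : Decidable (Spec_tokenize seq out) := by unfold Spec_tokenize; infer_instance

-- ===== CLAIM (what is proved, stated in full; the proofs are below) =====
def Claim_equal_tokenize : Prop := ∀ (seq : String), Dom_tokenize seq → Spec_tokenize seq (tokenize seq)

-- ===== LEMMAS AND PROOFS =====

lemma pv_prefix_singleton (c : Char) (l : List Char) : [c] <+: l ↔ l.head? = some c := by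
  constructor
  · rintro ⟨t, rfl⟩; rfl
  · intro h
    cases l with
    | nil => simp at h
    | cons a t => simp at h; exact ⟨t, by simp [h]⟩

lemma pv_find_singleton (c : Char) (s : List Char) :
    PySem.Chars.find s [c] = if c ∈ s then ((s.takeWhile (· != c)).length : Int) else -1 := by
  have hinfix : ([c] <:+: s) ↔ c ∈ s := by
    constructor
    · intro h; exact h.sublist.subset (by simp)
    · intro h
      obtain ⟨u, v, rfl⟩ := List.mem_iff_append.mp h
      exact ⟨u, v, by simp⟩
  by_cases hc : c ∈ s
  · rw [if_pos hc]
    have h0 : 0 ≤ PySem.Chars.find s [c] := (PySem.Chars.find_nonneg_iff s [c]).mpr (hinfix.mpr hc)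
    obtain ⟨hpre, hmin⟩ := PySem.Chars.find_spec h0
    have hsplit : s.takeWhile (· != c) ++ s.dropWhile (· != c) = s := List.takeWhile_append_dropWhile
    have hdrop : s.drop (s.takeWhile (· != c)).length = s.dropWhile (· != c) := by
      have := List.drop_left (l₁ := s.takeWhile (· != c)) (l₂ := s.dropWhile (· != c))
      rwa [hsplit] at this
    have hdwne : s.dropWhile (· != c) ≠ [] := by
      intro h
      rw [h, List.append_nil] at hsplit
      have := List.mem_takeWhile_imp (l := s) (p := (· != c)) (by rw [hsplit]; exact hc)
      simp at this
    have hdwhead : (s.dropWhile (· != c)).head hdwne = c := by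
      have := List.head_dropWhile_not (· != c) hdwne
      simpa using this
    have hdwpre : [c] <+: s.drop (s.takeWhile (· != c)).length := by
      rw [hdrop, pv_prefix_singleton, ← List.head_eq_iff_head?_eq_some hdwne]
      exact hdwhead
    have hle : (PySem.Chars.find s [c]).toNat ≤ (s.takeWhile (· != c)).length := by
      by_contra hlt
      exact hmin _ (by omega) hdwpre
    have hge : (s.takeWhile (· != c)).length ≤ (PySem.Chars.find s [c]).toNat := by
      by_contra hlt
      push Not at hlt
      rw [pv_prefix_singleton, List.head?_eq_getElem?, List.getElem?_drop, Nat.add_zero] at hpre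
      have h2 : ((s.takeWhile (· != c))[(PySem.Chars.find s [c]).toNat]'(by omega)) ∈ s.takeWhile (· != c) := List.getElem_mem _
      have h3 := List.mem_takeWhile_imp h2
      have h4 : (s.takeWhile (· != c))[(PySem.Chars.find s [c]).toNat]'(by omega) = c := by
        have h5 := (List.takeWhile_prefix (p := (· != c)) (l := s)).getElem (i := (PySem.Chars.find s [c]).toNat) (by omega)
        have hlen : (PySem.Chars.find s [c]).toNat < s.length := by
          have := (List.takeWhile_prefix (p := (· != c)) (l := s)).length_le
          omega
        rw [h5]
        have h6 := List.getElem?_eq_getElem (l := s) (i := (PySem.Chars.find s [c]).toNat) hlen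
        rw [h6] at hpre
        simpa using hpre
      simp [h4] at h3
    omega
  · rw [if_neg hc]
    exact (PySem.Chars.find_eq_neg_one_iff _ _).mpr (fun h => hc (hinfix.mp h))

-- decomposition at the first occurrence of c
lemma pv_split (c : Char) (s : List Char) (h : c ∈ s) :
    ∃ after, s.dropWhile (· != c) = c :: after ∧
      s.takeWhile (· != c) ++ c :: after = s := by
  have hsplit : s.takeWhile (· != c) ++ s.dropWhile (· != c) = s := List.takeWhile_append_dropWhile
  have hdwne : s.dropWhile (· != c) ≠ [] := by
    intro hnil
    rw [hnil, List.append_nil] at hsplit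
    have := List.mem_takeWhile_imp (l := s) (p := (· != c)) (by rw [hsplit]; exact h)
    simp at this
  obtain ⟨x, t, hxt⟩ := List.exists_cons_of_ne_nil hdwne
  have hx : x = c := by
    have h2 := List.head_dropWhile_not (· != c) hdwne
    have h3 : (List.dropWhile (fun x => x != c) s).head hdwne = x := by
      simp [hxt]
    rw [h3] at h2
    simpa using h2
  subst hx
  exact ⟨t, hxt, by rw [← hxt]; exact hsplit⟩

-- the TEXT state consumes a brace-free prefix into the buffer
lemma pv_goB_text (t : List Char) (h : '{' ∉ t) :
    ∀ rest buf, tokenizeGoB (t ++ rest) 0 buf = tokenizeGoB rest 0 (buf ++ t) := by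
  induction t with
  | nil => intro rest buf; simp
  | cons c t ih =>
    intro rest buf
    have hc : c ≠ '{' := fun h' => h (h' ▸ List.mem_cons_self)
    have ht : '{' ∉ t := fun h' => h (List.mem_cons_of_mem _ h')
    simp only [List.cons_append, tokenizeGoB, if_pos rfl, if_neg hc, ih ht]
    simp

-- the BRACE state consumes a close-free body into the buffer
lemma pv_goB_body (b : List Char) (h : '}' ∉ b) :
    ∀ rest buf, tokenizeGoB (b ++ rest) 1 buf = tokenizeGoB rest 1 (buf ++ b) := by
  induction b with
  | nil => intro rest buf; simp
  | cons c b ih =>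
    intro rest buf
    have hc : c ≠ '}' := fun h' => h (h' ▸ List.mem_cons_self)
    have hb : '}' ∉ b := fun h' => h (List.mem_cons_of_mem _ h')
    simp only [List.cons_append, tokenizeGoB]
    norm_num [hc, ih hb]

-- CLOSED0 on input not starting with '}' emits "{}" and restarts TEXT on the same input
lemma pv_goB_closed0 (l : List Char) (h : l[0]? ≠ some '}') :
    tokenizeGoB l 2 [] = [String.ofList ['{', '}']] ++ tokenizeGoB l 0 [] := by
  cases l with
  | nil => simp [tokenizeGoB]
  | cons c rest =>
    have hc : c ≠ '}' := by simpa using h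
    by_cases hb : c = '{'
    · subst hb; simp [tokenizeGoB]
    · simp [tokenizeGoB, hc, hb]

lemma pv_main (s : List Char) : ∀ (fuel k : Nat), k ≤ s.length → s.length - k < fuel →
    tokenizeGoA fuel s (k : Int) = tokenizeGoB (s.drop k) 0 [] := by
  intro fuel
  induction fuel with
  | zero => intro k hk hf; omega
  | succ fuel ih =>
    intro k hk hf
    by_cases hkl : k < s.length
    case neg =>
      have hke : k = s.length := by omega
      subst hke
      rw [List.drop_length]
      simp [tokenizeGoA, tokenizeGoB]
    case pos =>
    have htne : s.drop k ≠ [] := by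
      intro h
      have := congrArg List.length h
      simp at this
      omega
    have hfindA := PySem.Chars.findFrom_natCast s ['{'] k hk
    by_cases hbrace : '{' ∈ s.drop k
    case neg =>
      rw [pv_find_singleton, if_neg hbrace, if_pos rfl] at hfindA
      simp only [tokenizeGoA]
      rw [hfindA, if_pos (by exact_mod_cast hkl), if_neg (by simp)]
      rw [PySem.List.slice_from_natCast]
      rw [show s.drop k = s.drop k ++ [] from (List.append_nil _).symm, pv_goB_text _ hbrace]
      simp [tokenizeGoB, htne]
    case pos =>
      obtain ⟨after, hdw, hsp⟩ := pv_split '{' (s.drop k) hbrace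
      set text := (s.drop k).takeWhile (· != '{') with htext
      have hBtop : tokenizeGoB (s.drop k) 0 [] =
          (if text = [] then [] else [String.ofList text]) ++ tokenizeGoB after 1 [] := by
        have hnot : '{' ∉ text := by
          intro hmem
          have := List.mem_takeWhile_imp hmem
          simp at this
        rw [← hsp, pv_goB_text _ hnot]
        simp [tokenizeGoB]
      have hlen1 : s.length = k + text.length + 1 + after.length := by
        have := congrArg List.length hsp
        simp at this
        omega
      have hfindA' : PySem.Chars.findFrom s ['{'] (k : Int) = ((k + text.length : Nat) : Int) := by
        rw [hfindA, pv_find_singleton, if_pos hbrace]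
        push_cast
        ring
      have hdropkj : s.drop (k + text.length) = '{' :: after := by
        rw [← List.drop_drop, ← hsp]
        simp
      have hfindB := PySem.Chars.findFrom_natCast s ['}'] (k + text.length) (by omega)
      rw [hdropkj, pv_find_singleton] at hfindB
      have hpre : PySem.List.slice s (some (k:Int)) (some ((k+text.length : Nat):Int)) = text := by
        rw [PySem.List.slice_natCast]
        have h1 : k + text.length - k = text.length := by omega
        rw [h1, ← hsp]
        simp
      have hts : (if ((k:Int)) < ((k+text.length:Nat):Int) then [String.ofList text] else [])
          = (if text = [] then [] else [String.ofList text]) := by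
        by_cases h0 : text = []
        · simp [h0]
        · have h1 : 0 < text.length := List.length_pos_iff.mpr h0
          rw [if_pos (by omega), if_neg h0]
      by_cases hclose : '}' ∈ after
      case neg =>
        rw [if_neg (show ¬ ('}' ∈ '{' :: after) by simp [hclose]), if_pos rfl] at hfindB
        simp only [tokenizeGoA]
        rw [hfindA', if_pos (by exact_mod_cast hkl), if_pos (by omega), hfindB, if_pos rfl]
        have hc1 : ((s.length : Int) - 1) + 1 = ((s.length : Nat) : Int) := by ring
        have htake : ('{' :: after).take (s.length - (k + text.length)) = '{' :: after :=
          List.take_of_length_le (by simp; omega)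
        rw [hc1, hpre, hts, PySem.List.slice_natCast, hdropkj, htake,
          ih s.length le_rfl (by omega), List.drop_length]
        rw [hBtop, show after = after ++ [] from (List.append_nil _).symm, pv_goB_body _ hclose]
        simp [tokenizeGoB]
      case pos =>
        obtain ⟨after2, hdw2, hsp2⟩ := pv_split '}' after hclose
        set body := after.takeWhile (· != '}') with hbody
        have hbodyn : '}' ∉ body := by
          intro hmem
          have := List.mem_takeWhile_imp hmem
          simp at this
        have hlen2 : after.length = body.length + 1 + after2.length := by
          have := congrArg List.length hsp2
          simp at this
          omega
        have hBmid : tokenizeGoB after 1 [] = tokenizeGoB ('}' :: after2) 1 body := by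
          rw [← hsp2, pv_goB_body _ hbodyn]
          simp
        have hmm : ('}' ∈ ('{' :: after)) := by simp [hclose]
        have htw : List.takeWhile (fun x => x != '}') ('{' :: after) = '{' :: body := by
          simp
          rw [hbody]
        rw [if_pos hmm, htw] at hfindB
        have hfindB' : PySem.Chars.findFrom s ['}'] ((k + text.length : Nat) : Int)
            = ((k + text.length + body.length + 1 : Nat) : Int) := by
          rw [hfindB, if_neg (show ¬ ((((('{' :: body).length : Nat)) : Int) = -1) from by omega)]
          push_cast
          simp
          ring
        have hc2 : ((k + text.length + body.length + 1 : Nat) : Int) + 1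
            = ((k + text.length + body.length + 2 : Nat) : Int) := by push_cast; ring
        have hdrop2 : s.drop (k + text.length + body.length + 2) = after2 := by
          rw [show k + text.length + body.length + 2 = (k + text.length) + (body.length + 2) from by omega,
            ← List.drop_drop, hdropkj]
          rw [show body.length + 2 = body.length + 1 + 1 from rfl]
          simp only [List.drop_succ_cons]
          rw [← hsp2]
          have h9 : List.drop (body.length + 1) (body ++ '}' :: after2) = List.drop 1 ('}' :: after2) :=
            List.drop_length_add_append 1
          simp only [List.drop_one, List.tail_cons] at h9
          exact h9
        have hget : PySem.List.pyGet? s ((k + text.length + body.length + 2 : Nat) : Int) = after2[0]? := by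
          rw [PySem.List.pyGet?_natCast]
          rw [show (k + text.length + body.length + 2) = (k + text.length + body.length + 2) + 0 from by omega,
            ← List.getElem?_drop, hdrop2]
        simp only [tokenizeGoA]
        rw [hfindA', if_pos (by exact_mod_cast hkl), if_pos (by omega), hfindB',
          if_neg (show ¬ (((k + text.length + body.length + 1 : Nat) : Int) = -1) from by omega),
          hc2, hget]
        by_cases hA : body = [] ∧ after2[0]? = some '}'
        case pos =>
          obtain ⟨hb0, hh⟩ := hA
          obtain ⟨after3, ha3⟩ : ∃ t, after2 = '}' :: t := by
            cases after2 with
            | nil => simp at hh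
            | cons a t => simp at hh; exact ⟨t, by rw [hh]⟩
          have hb0' : body.length = 0 := by rw [hb0]; rfl
          have hl3 : after2.length = after3.length + 1 := by rw [ha3]; simp
          rw [if_pos (show ((k + text.length + body.length + 1 : Nat) : Int) = ((k + text.length : Nat) : Int) + 1 ∧
              ((s.length : Nat) : Int) > ((k + text.length + body.length + 2 : Nat) : Int) ∧ after2[0]? = some '}' from
            ⟨by push_cast; omega, by push_cast; omega, by rw [ha3]; rfl⟩)]
          have hc3 : ((k + text.length + body.length + 2 : Nat) : Int) + 1
              = ((k + text.length + body.length + 3 : Nat) : Int) := by push_cast; ring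
          rw [hc3, hpre, hts, PySem.List.slice_natCast,
            show k + text.length + body.length + 3 - (k + text.length) = body.length + 3 from by omega,
            hdropkj]
          rw [ih (k + text.length + body.length + 3) (by omega) (by omega)]
          have hdrop3 : s.drop (k + text.length + body.length + 3) = after3 := by
            rw [show k + text.length + body.length + 3 = (k + text.length + body.length + 2) + 1 from by omega,
              ← List.drop_drop, hdrop2, ha3]
            rfl
          have hafter : after = '}' :: '}' :: after3 := by rw [← hsp2, hb0, ha3]; rfl
          rw [hdrop3, hBtop, hBmid, hb0, ha3]
          simp [tokenizeGoB, hafter]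
        case neg =>
          rw [if_neg (show ¬ (((k + text.length + body.length + 1 : Nat) : Int) = ((k + text.length : Nat) : Int) + 1 ∧
              ((s.length : Nat) : Int) > ((k + text.length + body.length + 2 : Nat) : Int) ∧ after2[0]? = some '}') from by
            rintro ⟨c1, c2, c3⟩
            exact hA ⟨List.length_eq_zero_iff.mp (by push_cast at c1; omega), c3⟩)]
          rw [hc2, hpre, hts, PySem.List.slice_natCast,
            show k + text.length + body.length + 2 - (k + text.length) = body.length + 2 from by omega,
            hdropkj]
          have htok : ('{' :: after).take (body.length + 2) = '{' :: body ++ ['}'] := by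
            rw [← hsp2, show body.length + 2 = body.length + 1 + 1 from rfl]
            simp only [List.take_succ_cons]
            have h9 : List.take (body.length + 1) (body ++ '}' :: after2) = body ++ List.take 1 ('}' :: after2) :=
              List.take_length_add_append 1
            simpa using h9
          rw [htok]
          rw [ih (k + text.length + body.length + 2) (by omega) (by omega), hdrop2]
          rw [hBtop, hBmid]
          by_cases hb0 : body = []
          case pos =>
            have hh : after2[0]? ≠ some '}' := fun h => hA ⟨hb0, h⟩
            rw [hb0]
            simp only [tokenizeGoB, if_pos rfl]
            norm_num
            rw [pv_goB_closed0 _ hh]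
            simp
          case neg =>
            simp [tokenizeGoB, hb0]

-- ===== VERDICT (by name: the statement is the Claim_ definition above) =====
theorem tokenize_spec : Claim_equal_tokenize := by
  intro seq _
  unfold Spec_tokenize tokenize tokenize_alt
  simpa using pv_main seq.toList (seq.toList.length + 1) 0 (by omega) (by omega)
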